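-- pv_equiv track=rewrite | github.com/paul-katkov/SmoothStack-Training | Exercise8.py | func13
-- ===== SOURCE A (Python) =====
-- def func13(s):
--     output = ""
--     for i in range(len(s)):
--         if i == 0 or i == 3:
--             output += s[i].upper()
--         else:
--             output += s[i]
--     return output
-- ===== SOURCE B (Python) =====
-- def func13(s):
--     chars = list(s)
--     if len(chars) > 0:
--         chars[0] = chars[0].upper()
--     if len(chars) > 3:
--         chars[3] = chars[3].upper()
--     return ''.join(chars)
-- ===== Notes on version B (the rewrite author's own statement) =====
-- stated objective: simpler
-- what changed: Replaces A's index loop over every character (accumulating the output with per-character string concatenation and a per-index conditional) with two O(1) targeted in-place updates of positions 0 and 3 on list(s) followed by one join.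
import Mathlib
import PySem

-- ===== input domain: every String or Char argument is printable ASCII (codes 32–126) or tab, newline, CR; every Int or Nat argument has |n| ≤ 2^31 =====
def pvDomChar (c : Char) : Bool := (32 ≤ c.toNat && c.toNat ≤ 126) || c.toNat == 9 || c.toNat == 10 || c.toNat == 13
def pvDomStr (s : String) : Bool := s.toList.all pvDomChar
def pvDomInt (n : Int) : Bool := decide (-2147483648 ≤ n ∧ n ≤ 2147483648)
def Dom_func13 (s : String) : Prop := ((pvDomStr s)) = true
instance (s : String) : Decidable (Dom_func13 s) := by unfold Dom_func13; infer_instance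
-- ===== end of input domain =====

-- B replaces A's loop over every index with two targeted updates of positions 0 and 3; objective: simpler.

-- ===== PORT A =====
-- for i in range(len(s)): output += s[i].upper() if i in {0,3} else s[i]
def func13 (s : String) : String :=
  let cs := s.toList
  String.ofList <|
    (PySem.List.pyRange 0 (PySem.List.len cs) 1).foldl
      (fun out i =>
        if i = 0 ∨ i = 3 then out ++ PySem.Chars.upper [PySem.List.pyGetD cs i ' ']
        else out ++ [PySem.List.pyGetD cs i ' ']) []

-- ===== PORT B =====
-- list(s); guarded chars[0] = chars[0].upper(); chars[3] = chars[3].upper(); ''.join(chars)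
-- (a one-character string's .upper() is its upper-cased character: Chars.upperChar, exact on this domain)
def func13_alt (s : String) : String :=
  let cs0 := s.toList
  let cs1 := if 0 < cs0.length then
      PySem.List.pySetD cs0 0 (PySem.Chars.upperChar (PySem.List.pyGetD cs0 0 ' ')) else cs0
  let cs2 := if 3 < cs1.length then
      PySem.List.pySetD cs1 3 (PySem.Chars.upperChar (PySem.List.pyGetD cs1 3 ' ')) else cs1
  String.ofList cs2

-- ===== PRECONDITION & SPEC =====
def Spec_func13 (s : String) (out : String) : Prop := out = func13_alt s
instance (s : String) (out : String) : Decidable (Spec_func13 s out) := by unfold Spec_func13; infer_instance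

-- ===== CLAIM (what is proved, stated in full; the proofs are below) =====
def Claim_equal_func13 : Prop := ∀ (s : String), Dom_func13 s → Spec_func13 s (func13 s)

-- ===== LEMMAS AND PROOFS =====

-- the tail of A's loop (indices ≥ 4) just copies the remaining characters
lemma func13_tail (cs : List Char) (init : List Char) :
    (PySem.List.pyRange 4 (PySem.List.len cs) 1).foldl
      (fun out i =>
        if i = 0 ∨ i = 3 then out ++ PySem.Chars.upper [PySem.List.pyGetD cs i ' ']
        else out ++ [PySem.List.pyGetD cs i ' ']) init = init ++ cs.drop 4 := by
  rw [PySem.List.foldl_congr_mem _ _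
      (fun out i => out ++ [PySem.List.pyGetD cs i ' ']) init ?_]
  · rw [PySem.List.foldl_pyRange_pyGetD cs ' ' (fun out c => out ++ [c]) init (by norm_num : (0:Int) ≤ 4)]
    simpa using PySem.List.foldl_append_singleton (cs.drop 4) init
  · intro acc x hx
    have := (PySem.List.mem_pyRange_one).1 hx
    have h0 : ¬ (x = 0 ∨ x = 3) := by omega
    simp [h0]

lemma func13_list (cs : List Char) :
    (PySem.List.pyRange 0 (PySem.List.len cs) 1).foldl
      (fun out i =>
        if i = 0 ∨ i = 3 then out ++ PySem.Chars.upper [PySem.List.pyGetD cs i ' ']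
        else out ++ [PySem.List.pyGetD cs i ' ']) [] =
    (let cs1 := if 0 < cs.length then
        PySem.List.pySetD cs 0 (PySem.Chars.upperChar (PySem.List.pyGetD cs 0 ' ')) else cs
     if 3 < cs1.length then
        PySem.List.pySetD cs1 3 (PySem.Chars.upperChar (PySem.List.pyGetD cs1 3 ' ')) else cs1) := by
  have hup : ∀ c : Char, PySem.Chars.upper [c] = [PySem.Chars.upperChar c] := fun _ => rfl
  have hget : ∀ (xs : List Char) (n : Nat), PySem.List.pyGetD xs (n : Int) ' ' = xs.getD n ' ' :=
    fun xs n => PySem.List.pyGetD_natCast xs n ' '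
  have hset : ∀ (xs : List Char) (n : Nat) (v : Char),
      PySem.List.pySetD xs (n : Int) v = xs.set n v :=
    fun xs n v => PySem.List.pySetD_natCast xs n v
  have h1 : ((1:Int)) = ((1:Nat):Int) := rfl
  have h2 : ((2:Int)) = ((2:Nat):Int) := rfl
  have h3 : ((3:Int)) = ((3:Nat):Int) := rfl
  have h0 : ((0:Int)) = ((0:Nat):Int) := rfl
  match cs with
  | [] => simp [PySem.List.pyRange_one_eq_nil, PySem.List.len]
  | [a] =>
    have hl : PySem.List.len [a] = 1 := by simp [PySem.List.len]
    have hr : PySem.List.pyRange 0 1 1 = [0] := by decide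
    rw [hl, hr]
    simp only [List.foldl, hup, h0, hget, hset]
    norm_num
  | [a, b] =>
    have hl : PySem.List.len [a, b] = 2 := by simp [PySem.List.len]
    have hr : PySem.List.pyRange 0 2 1 = [0, 1] := by decide
    rw [hl, hr]
    simp only [List.foldl, hup, h0, h1, hget, hset]
    norm_num
  | [a, b, c] =>
    have hl : PySem.List.len [a, b, c] = 3 := by simp [PySem.List.len]
    have hr : PySem.List.pyRange 0 3 1 = [0, 1, 2] := by decide
    rw [hl, hr]
    simp only [List.foldl, hup, h0, h1, h2, hget, hset]
    norm_num
  | a :: b :: c :: d :: rest =>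
    have hlen : PySem.List.len (a :: b :: c :: d :: rest) = (rest.length : Int) + 4 := by
      simp [PySem.List.len]; omega
    rw [PySem.List.pyRange_one_append 0 4 (PySem.List.len (a :: b :: c :: d :: rest))
        (by norm_num) (by rw [hlen]; omega)]
    have h04 : PySem.List.pyRange 0 4 1 = [0, 1, 2, 3] := by decide
    rw [List.foldl_append, h04]
    simp only [List.foldl]
    rw [func13_tail]
    simp only [hup, h0, h1, h2, h3, hget, hset, List.getD, List.set]
    norm_num [List.getElem?_cons_zero, List.getElem?_cons_succ]

-- ===== VERDICT (by name: the statement is the Claim_ definition above) =====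
theorem func13_spec : Claim_equal_func13 := by
  intro s _
  unfold Spec_func13 func13 func13_alt
  simp only []
  exact congrArg String.ofList (func13_list s.toList)
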